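-- pv_equiv track=rewrite | github.com/iqrankhannwl/Python-Beyond-Basic | week-02/lecture-01/dillawar/sum_largest_sub_list.py | sum_of_largest_sub_list
-- ===== SOURCE A (Python) =====
-- def sum_of_largest_sub_list(given_list):
--     sub_list = []
--     count = 0
--     for i in range(len(given_list)-1):
--         j = i+1
--         if given_list[i] != given_list[j]:
--             count += given_list[i]
--         else:
--             sub_list.append(count)
--             count = 0
--     return max(sub_list)
-- ===== SOURCE B (Python) =====
-- def sum_of_largest_sub_list(given_list):
--     boundaries = [i for i in range(len(given_list) - 1)
--                   if given_list[i] == given_list[i + 1]]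
--     sub_list = []
--     prev = -1
--     for b in boundaries:
--         sub_list.append(sum(given_list[prev + 1:b]))
--         prev = b
--     return max(sub_list)
-- ===== Notes on version B (the rewrite author's own statement) =====
-- stated objective: alternative
-- what changed: B first collects the list of boundary indices (adjacent equal pairs), then computes each segment sum as a slice sum between consecutive boundaries, instead of A's single interleaved accumulate-and-reset loop.
import Mathlib
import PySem

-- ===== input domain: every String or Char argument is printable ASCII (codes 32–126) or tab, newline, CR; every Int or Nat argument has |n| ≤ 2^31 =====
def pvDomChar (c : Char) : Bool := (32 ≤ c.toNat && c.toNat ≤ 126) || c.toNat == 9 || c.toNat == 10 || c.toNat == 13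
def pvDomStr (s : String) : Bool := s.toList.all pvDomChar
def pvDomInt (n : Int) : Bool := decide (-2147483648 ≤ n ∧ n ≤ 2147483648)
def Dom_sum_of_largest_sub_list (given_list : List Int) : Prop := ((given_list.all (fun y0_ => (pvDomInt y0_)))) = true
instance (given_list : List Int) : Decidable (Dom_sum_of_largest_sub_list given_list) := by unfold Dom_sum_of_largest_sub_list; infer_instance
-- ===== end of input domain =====

-- B separates boundary-finding from slice-summing: it lists the boundary indices first,
-- then sums the slice between consecutive boundaries — an alternative decomposition of A's
-- interleaved accumulate/reset loop (same O(n) cost).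

-- ===== PORT A =====
def sum_of_largest_sub_list (given_list : List Int) : Int :=
  let st := (PySem.List.pyRange 0 ((given_list.length : Int) - 1) 1).foldl
    (fun (st : List Int × Int) i =>
      let j := i + 1
      if PySem.List.pyGetD given_list i 0 ≠ PySem.List.pyGetD given_list j 0 then
        (st.1, st.2 + PySem.List.pyGetD given_list i 0)
      else
        (st.1 ++ [st.2], 0)) ([], 0)
  -- max(sub_list): Python raises when no boundary exists; such inputs are outside Pre_, .getD 0 unused there
  (PySem.List.max? st.1 (fun x => x)).getD 0

-- ===== PORT B =====
def sum_of_largest_sub_list_alt (given_list : List Int) : Int :=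
  let boundaries := (PySem.List.pyRange 0 ((given_list.length : Int) - 1) 1).filter
    (fun i => PySem.List.pyGetD given_list i 0 == PySem.List.pyGetD given_list (i + 1) 0)
  let st := boundaries.foldl
    (fun (st : Int × List Int) b =>
      (b, st.2 ++ [(PySem.List.slice given_list (some (st.1 + 1)) (some b)).sum]))
    (-1, [])
  -- max(sub_list): Python raises when no boundary exists; such inputs are outside Pre_, .getD 0 unused there
  (PySem.List.max? st.2 (fun x => x)).getD 0

-- ===== PRECONDITION & SPEC =====
-- Pre_ excludes exactly the inputs where Python's max([]) raises ValueError in both A and B: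
-- lists that contain no adjacent equal pair, where sub_list stays empty.
def Pre_sum_of_largest_sub_list (given_list : List Int) : Prop :=
  ∃ i : Nat, i + 1 < given_list.length ∧
    given_list.getD i 0 = given_list.getD (i + 1) 0

instance (given_list : List Int) : Decidable (Pre_sum_of_largest_sub_list given_list) := by
  unfold Pre_sum_of_largest_sub_list
  exact decidable_of_iff
    ((List.range given_list.length).any
      (fun i => decide (i + 1 < given_list.length ∧ given_list.getD i 0 = given_list.getD (i+1) 0)))
    (by
      simp only [List.any_eq_true, List.mem_range, decide_eq_true_eq]
      constructor
      · rintro ⟨x, -, h⟩; exact ⟨x, h⟩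
      · rintro ⟨x, h⟩; exact ⟨x, by omega, h⟩)

def pvWitness_sum_of_largest_sub_list : List Int := [1, 2, 2, 3]

def Spec_sum_of_largest_sub_list (given_list : List Int) (out : Int) : Prop := out = sum_of_largest_sub_list_alt given_list
instance (given_list : List Int) (out : Int) : Decidable (Spec_sum_of_largest_sub_list given_list out) := by unfold Spec_sum_of_largest_sub_list; infer_instance

-- ===== CLAIM (what is proved, stated in full; the proofs are below) =====
def Claim_equal_sum_of_largest_sub_list : Prop := ∀ (given_list : List Int), Dom_sum_of_largest_sub_list given_list → Pre_sum_of_largest_sub_list given_list → Spec_sum_of_largest_sub_list given_list (sum_of_largest_sub_list given_list)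

-- ===== LEMMAS AND PROOFS =====

-- sum of a half-open slice grows by the element at the right end
lemma slice_sum_step (a : List Int) (t s : Int) (h0 : 0 ≤ t) (hts : t ≤ s)
    (hs : s < (a.length : Int)) :
    (PySem.List.slice a (some t) (some (s + 1))).sum
      = (PySem.List.slice a (some t) (some s)).sum + a[s.toNat]'(by omega) := by
  rw [PySem.List.slice_toNat a h0 (by omega : (0:Int) ≤ s + 1),
      PySem.List.slice_toNat a h0 (by omega : (0:Int) ≤ s)]
  have hlen : s.toNat < a.length := by omega
  have hstep : (s+1).toNat - t.toNat = (s.toNat - t.toNat) + 1 := by omega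
  rw [hstep, List.take_add_one]
  have hg : (a.drop t.toNat)[s.toNat - t.toNat]? = some (a[s.toNat]'hlen) := by
    rw [List.getElem?_drop]
    have h1 : t.toNat + (s.toNat - t.toNat) = s.toNat := by omega
    rw [h1, List.getElem?_eq_getElem hlen]
  simp [hg]

lemma slice_empty (a : List Int) (t : Int) (h0 : 0 ≤ t) :
    PySem.List.slice a (some t) (some t) = [] := by
  rw [PySem.List.slice_toNat a h0 h0]
  simp

-- main loop correspondence, by induction on the remaining range [s, e)
lemma loop_eq (a : List Int) : ∀ (k : Nat) (s e p : Int) (acc : List Int),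
    (e - s).toNat = k → -1 ≤ p → p < s → s ≤ e → e ≤ (a.length : Int) →
    (let stA := (PySem.List.pyRange s e 1).foldl
        (fun (st : List Int × Int) i =>
          let j := i + 1
          if PySem.List.pyGetD a i 0 ≠ PySem.List.pyGetD a j 0 then
            (st.1, st.2 + PySem.List.pyGetD a i 0)
          else
            (st.1 ++ [st.2], 0)) (acc, (PySem.List.slice a (some (p+1)) (some s)).sum)
     let stB := ((PySem.List.pyRange s e 1).filter
        (fun i => PySem.List.pyGetD a i 0 == PySem.List.pyGetD a (i + 1) 0)).foldl
        (fun (st : Int × List Int) b =>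
          (b, st.2 ++ [(PySem.List.slice a (some (st.1 + 1)) (some b)).sum])) (p, acc)
     stA.1 = stB.2 ∧ stA.2 = (PySem.List.slice a (some (stB.1 + 1)) (some e)).sum) := by
  intro k
  induction k with
  | zero =>
    intro s e p acc hk _ _ hse _
    have hes : e = s := by omega
    subst hes
    simp [PySem.List.pyRange_one_eq_nil le_rfl]
  | succ k ih =>
    intro s e p acc hk hp1 hps hse hen
    have hslt : s < e := by omega
    simp only [PySem.List.pyRange_one_cons hslt]
    by_cases heq : PySem.List.pyGetD a s 0 = PySem.List.pyGetD a (s + 1) 0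
    · -- boundary at s: A appends count, B records the boundary and the slice sum
      have h0 : (PySem.List.slice a (some (s+1)) (some (s+1))).sum = 0 := by
        rw [slice_empty a (s+1) (by omega)]; rfl
      have hthis := ih (s+1) e s (acc ++ [(PySem.List.slice a (some (p+1)) (some s)).sum])
        (by omega) (by omega) (by omega) (by omega) hen
      rw [h0] at hthis
      simp only [List.filter_cons, List.foldl_cons]
      simp only [heq, beq_self_eq_true, if_true, ne_eq, not_true_eq_false, if_false]
      simpa using hthis
    · -- no boundary at s: A accumulates a[s], B skips s
      simp only [List.filter_cons, List.foldl_cons]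
      simp only [beq_iff_eq, heq, ne_eq, not_false_eq_true, if_true, if_false]
      have hg : PySem.List.pyGetD a s 0 = a[s.toNat]'(by omega) :=
        PySem.List.pyGetD_eq_getElem a 0 (by omega) (by omega)
      have hstep : (PySem.List.slice a (some (p+1)) (some (s+1))).sum
          = (PySem.List.slice a (some (p+1)) (some s)).sum + a[s.toNat]'(by omega) :=
        slice_sum_step a (p+1) s (by omega) (by omega) (by omega)
      have := ih (s+1) e p acc (by omega) hp1 (by omega) (by omega) hen
      rw [hstep, ← hg] at this
      simpa using this

-- the two Python programs build the same sub_list, hence the same max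
lemma sub_lists_eq (a : List Int) :
    sum_of_largest_sub_list a = sum_of_largest_sub_list_alt a := by
  unfold sum_of_largest_sub_list sum_of_largest_sub_list_alt
  dsimp only
  by_cases hn : (a.length : Int) - 1 ≤ 0
  · rw [PySem.List.pyRange_one_eq_nil (by omega)]
    simp
  · have h := loop_eq a ((a.length : Int) - 1).toNat 0 ((a.length : Int) - 1) (-1) []
      (by omega) (by omega) (by omega) (by omega) (by omega)
    simp only at h
    rw [show (-1 : Int) + 1 = 0 from rfl, slice_empty a 0 (le_refl 0)] at h
    simp only [List.sum_nil] at h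
    rw [h.1]

-- ===== VERDICT (by name: the statement is the Claim_ definition above) =====
theorem sum_of_largest_sub_list_spec : Claim_equal_sum_of_largest_sub_list := by
  intro gl _ _
  unfold Spec_sum_of_largest_sub_list
  exact sub_lists_eq gl
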